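-- pv_equiv track=rewrite | github.com/ils-roshang/aws_audit_tool | modules/trend_analyzer.py | _dominant_severity_for
-- ===== SOURCE A (Python) =====
-- def _dominant_severity_for(findings: list, issue_snippet: str) -> str:
--     """Highest severity among findings whose issue text contains *issue_snippet*."""
--     order = {"HIGH": 0, "MEDIUM": 1, "LOW": 2, "INFO": 3}
--     best  = "INFO"
--     for f in findings:
--         if issue_snippet[:30].lower() in str(f.get("issue", "")).lower():
--             sev = f.get("severity", "INFO")
--             if order.get(sev, 3) < order.get(best, 3):
--                 best = sev
--     return best
-- ===== SOURCE B (Python) =====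
-- def _dominant_severity_for(findings: list, issue_snippet: str) -> str:
--     """Highest severity among findings whose issue text contains *issue_snippet*."""
--     needle = issue_snippet[:30].lower()
--     sevs = [f.get("severity", "INFO") for f in findings
--             if needle in str(f.get("issue", "")).lower()]
--     for level in ("HIGH", "MEDIUM", "LOW"):
--         if level in sevs:
--             return level
--     return "INFO"
-- ===== Notes on version B (the rewrite author's own statement) =====
-- stated objective: simpler
-- what changed: Collect matching severities in one pass, then scan the priority levels ('HIGH','MEDIUM','LOW') in order and return the first one present, instead of maintaining a running best with a rank dictionary.
import Mathlib
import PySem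

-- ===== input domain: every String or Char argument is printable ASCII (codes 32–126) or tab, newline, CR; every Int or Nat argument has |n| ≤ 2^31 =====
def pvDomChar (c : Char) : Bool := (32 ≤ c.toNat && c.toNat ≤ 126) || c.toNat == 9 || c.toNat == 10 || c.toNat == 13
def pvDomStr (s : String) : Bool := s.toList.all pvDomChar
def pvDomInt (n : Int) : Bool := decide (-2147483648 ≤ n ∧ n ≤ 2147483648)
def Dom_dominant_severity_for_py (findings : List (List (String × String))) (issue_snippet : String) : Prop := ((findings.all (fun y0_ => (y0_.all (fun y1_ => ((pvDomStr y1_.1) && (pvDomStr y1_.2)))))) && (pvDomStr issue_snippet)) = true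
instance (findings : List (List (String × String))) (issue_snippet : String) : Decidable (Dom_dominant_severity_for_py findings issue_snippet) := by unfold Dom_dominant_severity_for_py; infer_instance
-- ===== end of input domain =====

-- B replaces A's running-best-with-rank-dict loop by collecting the matching severities and
-- scanning the priority levels in order; same O(n) cost, simpler (objective: simpler).
-- (str(f.get("issue","")) is the identity here: the dict values are strings by the type convention.)

-- ===== PORT A =====
def pyOrder : PySem.Dict String Int :=
  PySem.Dict.ofList [("HIGH", (0 : Int)), ("MEDIUM", 1), ("LOW", 2), ("INFO", 3)]

def dominant_severity_for_py (findings : List (List (String × String))) (issue_snippet : String) : String :=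
  findings.foldl (fun best f =>
    if PySem.Str.isIn (PySem.Str.lower (PySem.Str.slice issue_snippet none (some 30)))
        (PySem.Str.lower ((PySem.Dict.mk f).getD "issue" "")) then
      let sev := (PySem.Dict.mk f).getD "severity" "INFO"
      if pyOrder.getD sev 3 < pyOrder.getD best 3 then sev else best
    else best) "INFO"

-- ===== PORT B =====
def dominant_severity_for_py_alt (findings : List (List (String × String))) (issue_snippet : String) : String :=
  let needle := PySem.Str.lower (PySem.Str.slice issue_snippet none (some 30))
  let sevs := (findings.filter (fun f =>
      PySem.Str.isIn needle (PySem.Str.lower ((PySem.Dict.mk f).getD "issue" "")))).map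
      (fun f => (PySem.Dict.mk f).getD "severity" "INFO")
  if "HIGH" ∈ sevs then "HIGH"
  else if "MEDIUM" ∈ sevs then "MEDIUM"
  else if "LOW" ∈ sevs then "LOW"
  else "INFO"

-- ===== PRECONDITION & SPEC =====
def Spec_dominant_severity_for_py (findings : List (List (String × String))) (issue_snippet : String) (out : String) : Prop := out = dominant_severity_for_py_alt findings issue_snippet
instance (findings : List (List (String × String))) (issue_snippet : String) (out : String) : Decidable (Spec_dominant_severity_for_py findings issue_snippet out) := by unfold Spec_dominant_severity_for_py; infer_instance

-- ===== CLAIM (what is proved, stated in full; the proofs are below) =====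
def Claim_equal_dominant_severity_for_py : Prop := ∀ (findings : List (List (String × String))) (issue_snippet : String), Dom_dominant_severity_for_py findings issue_snippet → Spec_dominant_severity_for_py findings issue_snippet (dominant_severity_for_py findings issue_snippet)

-- ===== LEMMAS AND PROOFS =====

/-- The severity rank A's dict lookup computes: 0/1/2 for the known levels, 3 otherwise. -/
def pvRank (s : String) : Nat :=
  if s = "HIGH" then 0 else if s = "MEDIUM" then 1 else if s = "LOW" then 2 else 3

def pvUnrank : Nat → String
  | 0 => "HIGH" | 1 => "MEDIUM" | 2 => "LOW" | _ => "INFO"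

theorem pyOrder_items : pyOrder.items = [("HIGH", (0 : Int)), ("MEDIUM", 1), ("LOW", 2), ("INFO", 3)] := by
  decide

theorem pvRank_order (s : String) : pyOrder.getD s 3 = (pvRank s : Int) := by
  by_cases h1 : s = "HIGH"
  · subst h1; decide
  by_cases h2 : s = "MEDIUM"
  · subst h2; decide
  by_cases h3 : s = "LOW"
  · subst h3; decide
  by_cases h4 : s = "INFO"
  · subst h4; decide
  · have b1 : (("HIGH" : String) == s) = false := by simp; exact fun h => h1 h.symm
    have b2 : (("MEDIUM" : String) == s) = false := by simp; exact fun h => h2 h.symm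
    have b3 : (("LOW" : String) == s) = false := by simp; exact fun h => h3 h.symm
    have b4 : (("INFO" : String) == s) = false := by simp; exact fun h => h4 h.symm
    simp [PySem.Dict.getD, PySem.Dict.get?, pyOrder_items, List.find?, pvRank,
      h1, h2, h3, b1, b2, b3, b4]

theorem pvRank_unrank (r : Nat) (hr : r ≤ 3) : pvRank (pvUnrank r) = r := by
  interval_cases r <;> decide

theorem pvUnrank_rank (s : String) (h : pvRank s < 3) : pvUnrank (pvRank s) = s := by
  unfold pvRank at *
  split_ifs at * with a b c <;> simp_all [pvUnrank]

/-- min-fold over ranks commutes with min in the accumulator. -/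
theorem pvFmin (l : List String) (a b : Nat) :
    l.foldl (fun x s => min x (pvRank s)) (min a b) =
      min a (l.foldl (fun x s => min x (pvRank s)) b) := by
  induction l generalizing b with
  | nil => rfl
  | cons s t ih =>
      simp only [List.foldl_cons]
      rw [min_assoc, ih]

/-- Closed form of the min-fold from 3: it is decided by which known levels occur. -/
theorem pvF3_eq (l : List String) :
    l.foldl (fun x s => min x (pvRank s)) 3 =
      if "HIGH" ∈ l then 0 else if "MEDIUM" ∈ l then 1 else if "LOW" ∈ l then 2 else 3 := by
  induction l with
  | nil => simp
  | cons s t ih =>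
      have h : min 3 (pvRank s) = min (pvRank s) 3 := Nat.min_comm _ _
      have e1 : (("HIGH" : String) = s) = (s = "HIGH") := propext eq_comm
      have e2 : (("MEDIUM" : String) = s) = (s = "MEDIUM") := propext eq_comm
      have e3 : (("LOW" : String) = s) = (s = "LOW") := propext eq_comm
      simp only [List.foldl_cons, h, pvFmin, ih, List.mem_cons, e1, e2, e3]
      by_cases h1 : s = "HIGH" <;> by_cases h2 : s = "MEDIUM" <;> by_cases h3 : s = "LOW" <;>
        by_cases m1 : "HIGH" ∈ t <;> by_cases m2 : "MEDIUM" ∈ t <;> by_cases m3 : "LOW" ∈ t <;>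
        simp_all [pvRank]

/-- A's running-best fold equals unrank of the min-fold of the ranks. -/
theorem pvFoldl_best (l : List String) (r : Nat) (hr : r ≤ 3) :
    l.foldl (fun best sev => if pvRank sev < pvRank best then sev else best) (pvUnrank r) =
      pvUnrank (l.foldl (fun x s => min x (pvRank s)) r) := by
  induction l generalizing r with
  | nil => rfl
  | cons s t ih =>
      simp only [List.foldl_cons, pvRank_unrank r hr]
      by_cases h : pvRank s < r
      · have hs : pvUnrank (pvRank s) = s := pvUnrank_rank s (by omega)
        have hmin : min r (pvRank s) = pvRank s := by omega
        rw [if_pos h, hmin, ← hs, ih _ (by omega), pvRank_unrank _ (by omega)]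
      · have hmin : min r (pvRank s) = r := by omega
        rw [if_neg h, hmin, ih _ hr]

-- ===== VERDICT (by name: the statement is the Claim_ definition above) =====
theorem dominant_severity_for_py_spec : Claim_equal_dominant_severity_for_py := by
  intro findings issue_snippet _
  unfold Spec_dominant_severity_for_py
  simp only [dominant_severity_for_py, dominant_severity_for_py_alt]
  set p : List (String × String) → Bool := fun f =>
    PySem.Str.isIn (PySem.Str.lower (PySem.Str.slice issue_snippet none (some 30)))
      (PySem.Str.lower ((PySem.Dict.mk f).getD "issue" "")) with hp
  set g : List (String × String) → String := fun f => (PySem.Dict.mk f).getD "severity" "INFO"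
    with hg
  simp only [pvRank_order, Nat.cast_lt]
  have key : findings.foldl (fun best f =>
        if p f = true then (if pvRank (g f) < pvRank best then g f else best) else best) "INFO"
      = ((findings.filter p).map g).foldl
          (fun best sev => if pvRank sev < pvRank best then sev else best) "INFO" := by
    rw [List.foldl_map, List.foldl_filter]
  rw [key, show ("INFO" : String) = pvUnrank 3 from rfl, pvFoldl_best _ 3 le_rfl, pvF3_eq]
  split_ifs <;> rfl
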